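-- pv_equiv track=rewrite | github.com/zhentingqi/scylla | modules/Task.py | none_or_more
-- ===== SOURCE A (Python) =====
-- def none_or_more(processed_input):
--     n = 0
--     for i in range(len(processed_input)):
--         for j in range(i + 1, len(processed_input)):
--             for k in range(j + 1, len(processed_input)):
--                 for l in range(k + 1, len(processed_input)):
--                     if (
--                         processed_input[i] + processed_input[j] + processed_input[k] + processed_input[l]
--                     ) % 10 == 0:
--                         n += 1
--     return n == 0
-- ===== SOURCE B (Python) =====
-- def none_or_more(processed_input):
--     # reach holds pairs (k, s): some k-element subset (k <= 4) of the scanned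
--     # prefix has sum congruent to s mod 10; one linear pass, state size <= 41.
--     reach = {(0, 0)}
--     for x in processed_input:
--         reach = reach | {(k + 1, (s + x) % 10) for (k, s) in reach if k < 4}
--     return (4, 0) not in reach
-- ===== Notes on version B (the rewrite author's own statement) =====
-- stated objective: faster
-- what changed: Replaces the four nested index loops counting all quadruples by a one-pass reachability DP over (subset size <= 4, sum mod 10) states, so the work per element is bounded by the 41 possible states.
import Mathlib
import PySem

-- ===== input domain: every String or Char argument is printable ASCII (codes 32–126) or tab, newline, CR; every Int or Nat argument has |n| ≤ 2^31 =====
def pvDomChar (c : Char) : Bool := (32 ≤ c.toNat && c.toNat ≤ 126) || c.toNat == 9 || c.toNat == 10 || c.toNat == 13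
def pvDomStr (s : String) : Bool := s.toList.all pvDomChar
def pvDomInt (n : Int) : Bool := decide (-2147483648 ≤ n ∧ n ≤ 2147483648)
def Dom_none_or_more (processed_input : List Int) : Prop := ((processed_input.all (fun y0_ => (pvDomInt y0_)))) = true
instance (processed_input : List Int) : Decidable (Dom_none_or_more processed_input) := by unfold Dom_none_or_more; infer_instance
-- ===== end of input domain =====

-- B replaces A's four nested index loops (count every quadruple, O(n^4)) by a single pass
-- maintaining the reachable (subset size ≤ 4, sum mod 10) states; same return value.

-- ===== PORT A =====
def none_or_more (processed_input : List Int) : Bool :=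
  let n : Int :=
    (PySem.List.pyRange 0 (processed_input.length : Int) 1).foldl (fun n i =>
      (PySem.List.pyRange (i + 1) (processed_input.length : Int) 1).foldl (fun n j =>
        (PySem.List.pyRange (j + 1) (processed_input.length : Int) 1).foldl (fun n k =>
          (PySem.List.pyRange (k + 1) (processed_input.length : Int) 1).foldl (fun n m =>
            if PySem.Int.mod
                (PySem.List.pyGetD processed_input i 0 + PySem.List.pyGetD processed_input j 0 +
                  PySem.List.pyGetD processed_input k 0 + PySem.List.pyGetD processed_input m 0) 10
                == 0 then
              n + 1
            else n) n) n) n) 0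
  n == 0

-- ===== PORT B =====
def none_or_more_alt (processed_input : List Int) : Bool :=
  let reach : PySem.Set (Int × Int) :=
    processed_input.foldl (fun reach x =>
      PySem.Set.union reach
        (reach.foldl (fun acc q =>
          if q.1 < 4 then PySem.Set.add acc (q.1 + 1, PySem.Int.mod (q.2 + x) 10) else acc)
          PySem.Set.empty))
      (PySem.Set.ofList [((0 : Int), (0 : Int))])
  !(PySem.Set.contains reach ((4 : Int), (0 : Int)))

-- ===== PRECONDITION & SPEC =====
def Spec_none_or_more (processed_input : List Int) (out : Bool) : Prop := out = none_or_more_alt processed_input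
instance (processed_input : List Int) (out : Bool) : Decidable (Spec_none_or_more processed_input out) := by unfold Spec_none_or_more; infer_instance

-- ===== CLAIM (what is proved, stated in full; the proofs are below) =====
def Claim_equal_none_or_more : Prop := ∀ (processed_input : List Int), Dom_none_or_more processed_input → Spec_none_or_more processed_input (none_or_more processed_input)

-- ===== LEMMAS AND PROOFS =====

-- the common specification: some 4-element sublist has sum divisible by 10
def HasQuad (l : List Int) : Prop :=
  ∃ t : List Int, t.Sublist l ∧ t.length = 4 ∧ PySem.Int.mod t.sum 10 = 0

-- number of sublists t of ys with t.length = r and (a + t.sum) % 10 == 0,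
-- in the recursion shape A's nested loops produce
def cgen : Nat → Int → List Int → Int
  | 0, a, _ => if PySem.Int.mod a 10 = 0 then 1 else 0
  | _ + 1, _, [] => 0
  | r + 1, a, y :: ys => cgen r (a + y) ys + cgen (r + 1) a ys

-- fold of a "head and rest" summand over all suffix positions
def tSum (h : Int → List Int → Int) : List Int → Int
  | [] => 0
  | x :: xs => h x xs + tSum h xs

lemma tSum_cgen (r : Nat) (a : Int) (ys : List Int) :
    tSum (fun y zs => cgen r (a + y) zs) ys = cgen (r + 1) a ys := by
  induction ys with
  | nil => rfl
  | cons y ys ih => simp [tSum, cgen, ih]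

lemma cgen_one (a : Int) (ys : List Int) :
    cgen 1 a ys = ((ys.countP fun y => PySem.Int.mod (a + y) 10 == 0) : Int) := by
  induction ys with
  | nil => rfl
  | cons y ys ih =>
      by_cases h : PySem.Int.mod (a + y) 10 = 0
      all_goals simp [cgen, ih, List.countP_cons]; ring

lemma cgen_nonneg (ys : List Int) : ∀ (r : Nat) (a : Int), 0 ≤ cgen r a ys := by
  induction ys with
  | nil => intro r a; cases r <;> simp [cgen]; split <;> simp
  | cons y ys ih =>
      intro r a
      cases r with
      | zero => simp [cgen]; split <;> simp
      | succ r => have := ih r (a + y); have := ih (r + 1) a; simp [cgen]; omega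

-- the key loop-to-suffix lemma: a fold over range(a, len(l)) whose body combines
-- l[k] with the suffix after k equals the structural tSum over drop a
lemma foldl_range_tSum (l : List Int) (h : Int → List Int → Int) :
    ∀ (d : Nat) (a n : Int), 0 ≤ a → l.length - a.toNat = d →
    (PySem.List.pyRange a (l.length : Int) 1).foldl
        (fun n k => n + h (PySem.List.pyGetD l k 0) (l.drop (k + 1).toNat)) n
      = n + tSum h (l.drop a.toNat) := by
  intro d
  induction d with
  | zero =>
      intro a n ha hd
      have hle : (l.length : Int) ≤ a := by omega
      rw [PySem.List.pyRange_one_eq_nil hle]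
      have : l.drop a.toNat = [] := List.drop_eq_nil_of_le (by omega)
      simp [this, tSum]
  | succ d ih =>
      intro a n ha hd
      have hlt : a < (l.length : Int) := by omega
      have hna : a.toNat < l.length := by omega
      rw [PySem.List.pyRange_one_cons hlt]
      simp only [List.foldl_cons]
      rw [ih (a + 1) _ (by omega) (by omega)]
      have hget : PySem.List.pyGetD l a 0 = l[a.toNat] :=
        PySem.List.pyGetD_eq_getElem l 0 ha hlt
      have h1 : (a + 1).toNat = a.toNat + 1 := by omega
      have hdrop : l.drop a.toNat = l[a.toNat] :: l.drop (a.toNat + 1) :=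
        List.drop_eq_getElem_cons hna
      rw [hget, h1, hdrop]
      simp [tSum]
      ring

-- lift one loop level: a range fold adding "cgen r (s + l[k]) (suffix after k)" is cgen (r+1)
lemma lift_level (l : List Int) (r : Nat) (s : Int) (a n : Int) (ha : 0 ≤ a) :
    (PySem.List.pyRange a (l.length : Int) 1).foldl
        (fun n k => n + cgen r (s + PySem.List.pyGetD l k 0) (l.drop (k + 1).toNat)) n
      = n + cgen (r + 1) s (l.drop a.toNat) := by
  rw [foldl_range_tSum l (fun c zs => cgen r (s + c) zs) (l.length - a.toNat) a n ha rfl,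
    tSum_cgen]

lemma none_or_more_eq_cgen (l : List Int) : none_or_more l = (cgen 4 0 l == 0) := by
  unfold none_or_more
  have inner : ∀ (s k n : Int), 0 ≤ k + 1 →
      (PySem.List.pyRange (k + 1) (l.length : Int) 1).foldl
          (fun n m => if PySem.Int.mod (s + PySem.List.pyGetD l m 0) 10 == 0 then n + 1 else n) n
        = n + cgen 1 s (l.drop (k + 1).toNat) := by
    intro s k n hk
    rw [PySem.List.foldl_pyRange_pyGetD' l 0
      (f := fun n y => if PySem.Int.mod (s + y) 10 == 0 then n + 1 else n) (init := n) hk,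
      PySem.List.foldl_if_add_one, cgen_one]
  have step2 : ∀ (i j n : Int), 0 ≤ i → 0 ≤ j →
      (PySem.List.pyRange (j + 1) (l.length : Int) 1).foldl (fun n k =>
        (PySem.List.pyRange (k + 1) (l.length : Int) 1).foldl (fun n m =>
          if PySem.Int.mod
              (PySem.List.pyGetD l i 0 + PySem.List.pyGetD l j 0 +
                PySem.List.pyGetD l k 0 + PySem.List.pyGetD l m 0) 10 == 0 then
            n + 1
          else n) n) n
        = n + cgen 2 (PySem.List.pyGetD l i 0 + PySem.List.pyGetD l j 0) (l.drop (j + 1).toNat) := by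
    intro i j n hi hj
    refine (PySem.List.foldl_congr_mem _ _ (fun n k =>
      n + cgen 1 (PySem.List.pyGetD l i 0 + PySem.List.pyGetD l j 0 + PySem.List.pyGetD l k 0)
        (l.drop (k + 1).toNat)) _ ?_).trans (lift_level l 1 _ (j + 1) n (by omega))
    intro acc k hk
    have hk' := (PySem.List.mem_pyRange_one.mp hk).1
    exact inner _ k acc (by omega)
  have step1 : ∀ (i n : Int), 0 ≤ i →
      (PySem.List.pyRange (i + 1) (l.length : Int) 1).foldl (fun n j =>
        (PySem.List.pyRange (j + 1) (l.length : Int) 1).foldl (fun n k =>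
          (PySem.List.pyRange (k + 1) (l.length : Int) 1).foldl (fun n m =>
            if PySem.Int.mod
                (PySem.List.pyGetD l i 0 + PySem.List.pyGetD l j 0 +
                  PySem.List.pyGetD l k 0 + PySem.List.pyGetD l m 0) 10 == 0 then
              n + 1
            else n) n) n) n
        = n + cgen 3 (PySem.List.pyGetD l i 0) (l.drop (i + 1).toNat) := by
    intro i n hi
    refine (PySem.List.foldl_congr_mem _ _ (fun n j =>
      n + cgen 2 (PySem.List.pyGetD l i 0 + PySem.List.pyGetD l j 0) (l.drop (j + 1).toNat))
      _ ?_).trans (lift_level l 2 _ (i + 1) n (by omega))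
    intro acc j hj
    have hj' := (PySem.List.mem_pyRange_one.mp hj).1
    exact step2 i j acc hi (by omega)
  have top :
      (PySem.List.pyRange 0 (l.length : Int) 1).foldl (fun n i =>
        (PySem.List.pyRange (i + 1) (l.length : Int) 1).foldl (fun n j =>
          (PySem.List.pyRange (j + 1) (l.length : Int) 1).foldl (fun n k =>
            (PySem.List.pyRange (k + 1) (l.length : Int) 1).foldl (fun n m =>
              if PySem.Int.mod
                  (PySem.List.pyGetD l i 0 + PySem.List.pyGetD l j 0 +
                    PySem.List.pyGetD l k 0 + PySem.List.pyGetD l m 0) 10 == 0 then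
                n + 1
              else n) n) n) n) (0 : Int)
        = cgen 4 0 l := by
    refine (PySem.List.foldl_congr_mem _ _ (fun n i =>
      n + cgen 3 (0 + PySem.List.pyGetD l i 0) (l.drop (i + 1).toNat)) _ ?_).trans ?_
    · intro acc i hi
      have hi' := (PySem.List.mem_pyRange_one.mp hi).1
      rw [step1 i acc hi']
      simp
    · have := lift_level l 3 0 0 0 le_rfl
      simpa using this
  simp only [top]

lemma cgen_pos_iff (ys : List Int) : ∀ (r : Nat) (a : Int), 0 < cgen r a ys ↔
    ∃ t : List Int, t.Sublist ys ∧ t.length = r ∧ PySem.Int.mod (a + t.sum) 10 = 0 := by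
  induction ys with
  | nil =>
      intro r a
      cases r with
      | zero =>
          simp only [cgen]
          split_ifs with h
          · exact iff_of_true one_pos
              ⟨[], List.nil_sublist _, rfl, by simp only [List.sum_nil, add_zero]; exact h⟩
          · constructor
            · intro h0; omega
            · rintro ⟨t, ht, hlen, hm⟩
              rw [List.sublist_nil] at ht
              subst ht
              simp only [List.sum_nil, add_zero] at hm
              exact absurd hm h
      | succ r =>
          simp only [cgen]
          constructor
          · intro h0; omega
          · rintro ⟨t, ht, hlen, hm⟩
            rw [List.sublist_nil] at ht
            subst ht; simp at hlen
  | cons y ys ih =>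
      intro r a
      cases r with
      | zero =>
          simp only [cgen]
          split_ifs with h
          · exact iff_of_true one_pos
              ⟨[], List.nil_sublist _, rfl, by simp only [List.sum_nil, add_zero]; exact h⟩
          · constructor
            · intro h0; omega
            · rintro ⟨t, ht, hlen, hm⟩
              rw [List.length_eq_zero_iff] at hlen
              subst hlen
              simp only [List.sum_nil, add_zero] at hm
              exact absurd hm h
      | succ r =>
          have h1 := cgen_nonneg ys r (a + y)
          have h2 := cgen_nonneg ys (r + 1) a
          have hsplit : 0 < cgen (r + 1) a (y :: ys) ↔
              0 < cgen r (a + y) ys ∨ 0 < cgen (r + 1) a ys := by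
            simp only [cgen]; omega
          rw [hsplit, ih r (a + y), ih (r + 1) a]
          constructor
          · rintro (⟨t, ht, hlen, hm⟩ | ⟨t, ht, hlen, hm⟩)
            · exact ⟨y :: t, List.Sublist.cons₂ y ht, by simp [hlen],
                by simpa [add_assoc] using hm⟩
            · exact ⟨t, List.sublist_cons_of_sublist y ht, hlen, hm⟩
          · rintro ⟨t, ht, hlen, hm⟩
            rcases List.sublist_cons_iff.mp ht with ht' | ⟨r', rfl, hr'⟩
            · exact Or.inr ⟨t, ht', hlen, hm⟩
            · exact Or.inl ⟨r', hr', by simpa using hlen, by simpa [add_assoc] using hm⟩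

lemma none_or_more_true_iff (l : List Int) : none_or_more l = true ↔ ¬ HasQuad l := by
  rw [none_or_more_eq_cgen, beq_iff_eq]
  have hz : cgen 4 0 l = 0 ↔ ¬ (0 < cgen 4 0 l) := by
    have := cgen_nonneg l 4 0; omega
  rw [hz, cgen_pos_iff]
  unfold HasQuad
  simp

-- B-side: membership after one DP step
lemma mem_step (s : PySem.Set (Int × Int)) (x : Int) (p : Int × Int) :
    p ∈ PySem.Set.union s
        (s.foldl (fun acc q =>
          if q.1 < 4 then PySem.Set.add acc (q.1 + 1, PySem.Int.mod (q.2 + x) 10) else acc)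
          PySem.Set.empty) ↔
      p ∈ s ∨ ∃ q ∈ s, q.1 < 4 ∧ p = (q.1 + 1, PySem.Int.mod (q.2 + x) 10) := by
  rw [PySem.Set.mem_union,
    PySem.List.foldl_ite_eq_foldl_filter (fun q : Int × Int => q.1 < 4)
      (fun acc q => PySem.Set.add acc (q.1 + 1, PySem.Int.mod (q.2 + x) 10)) s PySem.Set.empty,
    PySem.Set.mem_foldl_add (f := fun q : Int × Int => (q.1 + 1, PySem.Int.mod (q.2 + x) 10))]
  simp [PySem.Set.empty, List.mem_filter, and_assoc]

lemma sublist_append_singleton_iff (t l : List Int) (x : Int) :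
    t.Sublist (l ++ [x]) ↔ t.Sublist l ∨ ∃ r, t = r ++ [x] ∧ r.Sublist l := by
  constructor
  · intro h
    have h' : t.reverse.Sublist (x :: l.reverse) := by simpa using h.reverse
    rcases List.sublist_cons_iff.mp h' with h1 | ⟨r, hr, hrsub⟩
    · left; simpa using h1.reverse
    · right
      refine ⟨r.reverse, ?_, by simpa using hrsub.reverse⟩
      rw [← List.reverse_reverse t, hr]; simp
  · rintro (h | ⟨r, rfl, hr⟩)
    · exact h.trans (List.sublist_append_left l [x])
    · exact hr.append (List.Sublist.refl [x])

-- B's invariant: reach after scanning l is exactly the (length, sum mod 10) data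
-- of the sublists of l of length at most 4
lemma reach_inv (l : List Int) (p : Int × Int) :
    p ∈ l.foldl (fun reach x =>
        PySem.Set.union reach
          (reach.foldl (fun acc q =>
            if q.1 < 4 then PySem.Set.add acc (q.1 + 1, PySem.Int.mod (q.2 + x) 10) else acc)
            PySem.Set.empty))
        (PySem.Set.ofList [((0 : Int), (0 : Int))]) ↔
      ∃ t : List Int, t.Sublist l ∧ t.length ≤ 4 ∧
        p = ((t.length : Int), PySem.Int.mod t.sum 10) := by
  induction l using List.reverseRecOn generalizing p with
  | nil =>
      simp only [List.foldl_nil]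
      constructor
      · intro hp
        refine ⟨[], List.Sublist.refl [], by simp, ?_⟩
        simpa [PySem.Set.ofList] using hp
      · rintro ⟨t, ht, -, rfl⟩
        rw [List.sublist_nil] at ht
        subst ht
        simp [PySem.Set.ofList]
  | append_singleton l x ih =>
      rw [List.foldl_append, List.foldl_cons, List.foldl_nil, mem_step]
      constructor
      · rintro (hp | ⟨q, hq, hlt, rfl⟩)
        · rcases ih p |>.mp hp with ⟨t, ht, hlen, rfl⟩
          exact ⟨t, ht.trans (List.sublist_append_left l [x]), hlen, rfl⟩
        · rcases ih q |>.mp hq with ⟨t, ht, hlen, rfl⟩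
          have hlen4 : t.length < 4 := by simpa using hlt
          refine ⟨t ++ [x], ht.append (List.Sublist.refl [x]), by simp; omega, ?_⟩
          simp
      · rintro ⟨t, ht, hlen, rfl⟩
        rcases (sublist_append_singleton_iff t l x).mp ht with ht' | ⟨r, rfl, hr⟩
        · exact Or.inl ((ih _).mpr ⟨t, ht', hlen, rfl⟩)
        · refine Or.inr ⟨((r.length : Int), PySem.Int.mod r.sum 10),
            (ih _).mpr ⟨r, hr, by simp at hlen; omega, rfl⟩, by simp at hlen ⊢; omega, ?_⟩
          simp

lemma none_or_more_alt_true_iff (l : List Int) : none_or_more_alt l = true ↔ ¬ HasQuad l := by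
  unfold none_or_more_alt
  rw [Bool.not_eq_eq_eq_not, Bool.not_true, ← Bool.not_eq_true, PySem.Set.contains_iff,
    reach_inv]
  unfold HasQuad
  constructor
  · rintro hno ⟨t, ht, hlen, hm⟩
    exact hno ⟨t, ht, by omega, by rw [hlen, hm]; norm_num⟩
  · rintro hno ⟨t, ht, hlen, hp⟩
    have h4 : t.length = 4 := by
      have h1 := congrArg Prod.fst hp
      simp at h1
      omega
    have hm : PySem.Int.mod t.sum 10 = 0 := by
      have h2 := congrArg Prod.snd hp
      simpa using h2.symm
    exact hno ⟨t, ht, h4, hm⟩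

-- ===== VERDICT (by name: the statement is the Claim_ definition above) =====
theorem none_or_more_spec : Claim_equal_none_or_more := by
  intro l _
  unfold Spec_none_or_more
  rw [Bool.eq_iff_iff, none_or_more_true_iff, none_or_more_alt_true_iff]
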